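-- pv_equiv track=rewrite | github.com/Beba05/RS_vjezbe | RS1_vjezbe/Vj11a.py | grupiraj_po_paritetu
-- ===== SOURCE A (Python) =====
-- def grupiraj_po_paritetu(lista):
--     rezultat = {'parni': [], 'neparni': []}
--
--     for broj in lista:
--         if broj % 2 == 0:
--             rezultat['parni'].append(broj)
--         else:
--             rezultat['neparni'].append(broj)
--
--     return rezultat
-- ===== SOURCE B (Python) =====
-- def grupiraj_po_paritetu(lista):
--     # Stable sort by the binary parity key brings all evens (key 0) first,
--     # keeping original order within each class; then split at the even count.
--     po_kljucu = sorted(lista, key=lambda x: x % 2)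
--     broj_parnih = sum(1 for x in lista if x % 2 == 0)
--     return {'parni': po_kljucu[:broj_parnih], 'neparni': po_kljucu[broj_parnih:]}
-- ===== Notes on version B (the rewrite author's own statement) =====
-- stated objective: alternative
-- what changed: Replaced A's single bucket-accumulating loop with a stable sort by the binary parity key followed by a split of the sorted list at the even count; correctness rests on sort stability preserving insertion order within each parity class.
import Mathlib
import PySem

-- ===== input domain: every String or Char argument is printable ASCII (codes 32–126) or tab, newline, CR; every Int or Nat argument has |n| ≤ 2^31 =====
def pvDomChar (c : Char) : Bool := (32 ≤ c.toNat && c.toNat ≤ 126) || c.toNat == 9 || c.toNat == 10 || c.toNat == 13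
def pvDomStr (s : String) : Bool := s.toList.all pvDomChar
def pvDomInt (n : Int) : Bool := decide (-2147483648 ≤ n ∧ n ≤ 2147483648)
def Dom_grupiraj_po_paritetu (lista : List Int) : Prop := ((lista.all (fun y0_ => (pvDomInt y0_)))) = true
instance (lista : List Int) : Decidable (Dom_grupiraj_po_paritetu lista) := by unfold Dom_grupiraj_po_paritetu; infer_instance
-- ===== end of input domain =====

-- B groups by parity via a stable sort on the binary parity key followed by a split at the even
-- count, instead of A's single bucket-accumulating loop (alternative algorithm, O(n log n)).

-- ===== PORT A =====
-- A: one pass, appending each element to the 'parni' or 'neparni' bucket.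
def grupiraj_po_paritetu (lista : List Int) : List (String × List Int) :=
  let rezultat := lista.foldl
    (fun (acc : List Int × List Int) broj =>
      if PySem.Int.mod broj 2 = 0 then (acc.1 ++ [broj], acc.2) else (acc.1, acc.2 ++ [broj]))
    ([], [])
  [("parni", rezultat.1), ("neparni", rezultat.2)]

-- ===== PORT B =====
-- B: stable sort by parity key, count the evens, split the sorted list there.
def grupiraj_po_paritetu_alt (lista : List Int) : List (String × List Int) :=
  let poKljucu := PySem.List.sorted lista (fun x => PySem.Int.mod x 2) false
  let brojParnih : Int :=
    lista.foldl (fun s x => if PySem.Int.mod x 2 = 0 then s + 1 else s) 0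
  [("parni", PySem.List.slice poKljucu none (some brojParnih)),
   ("neparni", PySem.List.slice poKljucu (some brojParnih) none)]

-- ===== PRECONDITION & SPEC =====
def Spec_grupiraj_po_paritetu (lista : List Int) (out : List (String × List Int)) : Prop := out = grupiraj_po_paritetu_alt lista
instance (lista : List Int) (out : List (String × List Int)) : Decidable (Spec_grupiraj_po_paritetu lista out) := by unfold Spec_grupiraj_po_paritetu; infer_instance

-- ===== CLAIM =====
def Claim_equal_grupiraj_po_paritetu : Prop := ∀ (lista : List Int), Dom_grupiraj_po_paritetu lista → Spec_grupiraj_po_paritetu lista (grupiraj_po_paritetu lista)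

-- ===== LEMMAS AND PROOFS =====

-- A's loop invariant: the fold extends the two accumulators by the two parity filters.
theorem grupiraj_fold_eq (lista : List Int) (p n : List Int) :
    lista.foldl
      (fun (acc : List Int × List Int) broj =>
        if PySem.Int.mod broj 2 = 0 then (acc.1 ++ [broj], acc.2) else (acc.1, acc.2 ++ [broj]))
      (p, n)
    = (p ++ lista.filter (fun x => PySem.Int.mod x 2 = 0),
       n ++ lista.filter (fun x => PySem.Int.mod x 2 ≠ 0)) := by
  induction lista generalizing p n with
  | nil => simp
  | cons b t ih =>
    simp only [List.foldl_cons, List.filter_cons]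
    by_cases h : PySem.Int.mod b 2 = 0
    · rw [if_pos h, ih, if_pos (decide_eq_true h), if_neg (by simpa using h)]
      simp [List.append_assoc]
    · rw [if_neg h, ih, if_neg (by simpa using h), if_pos (by simpa using h)]
      simp [List.append_assoc]

-- every Python mod-2 remainder is 0 or 1
theorem pymod2 (y : Int) : PySem.Int.mod y 2 = y % 2 := by
  simp [PySem.Int.mod, Int.fmod_eq_emod]

theorem mod2_cases (y : Int) : PySem.Int.mod y 2 = 0 ∨ PySem.Int.mod y 2 = 1 := by
  rw [pymod2]; omega

-- inserting an even element into evens-then-odds lands between the two blocks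
theorem ins_even (x : Int) (E O : List Int) (hx : PySem.Int.mod x 2 = 0)
    (hE : ∀ y ∈ E, PySem.Int.mod y 2 = 0) (hO : ∀ y ∈ O, PySem.Int.mod y 2 = 1) :
    PySem.List.insertBy (fun a b => decide (PySem.Int.mod a 2 < PySem.Int.mod b 2)) x (E ++ O)
    = E ++ x :: O := by
  induction E with
  | nil =>
    cases O with
    | nil => rfl
    | cons z zs =>
      have hz := hO z (by simp)
      rw [pymod2] at hx hz
      simp [PySem.List.insertBy, hx, hz]
  | cons e E' ih =>
    have he := hE e (by simp)
    rw [pymod2] at hx he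
    rw [List.cons_append, show PySem.List.insertBy
        (fun a b => decide (PySem.Int.mod a 2 < PySem.Int.mod b 2)) x (e :: (E' ++ O))
      = if (decide (PySem.Int.mod x 2 < PySem.Int.mod e 2)) = true then x :: e :: (E' ++ O)
        else e :: PySem.List.insertBy
          (fun a b => decide (PySem.Int.mod a 2 < PySem.Int.mod b 2)) x (E' ++ O) from rfl,
      if_neg (by simp [hx, he])]
    rw [ih (fun y hy => hE y (by simp [hy]))]
    simp

-- inserting an odd element (key 1, never strictly less than any key) lands at the end
theorem ins_odd (x : Int) (L : List Int) (hx : PySem.Int.mod x 2 = 1) :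
    PySem.List.insertBy (fun a b => decide (PySem.Int.mod a 2 < PySem.Int.mod b 2)) x L
    = L ++ [x] := by
  apply PySem.List.insertBy_of_forall_not_before
  intro y hy
  rw [pymod2] at hx
  rcases mod2_cases y with h | h <;> rw [pymod2] at h <;> simp [hx, h]

-- the insertion-sort fold keeps the evens-then-odds shape, extending each block by its filter
theorem foldl_ins (lista E O : List Int)
    (hE : ∀ y ∈ E, PySem.Int.mod y 2 = 0) (hO : ∀ y ∈ O, PySem.Int.mod y 2 = 1) :
    lista.foldl
      (fun acc x => PySem.List.insertBy
        (fun a b => decide (PySem.Int.mod a 2 < PySem.Int.mod b 2)) x acc) (E ++ O)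
    = (E ++ lista.filter (fun x => PySem.Int.mod x 2 = 0))
      ++ (O ++ lista.filter (fun x => PySem.Int.mod x 2 ≠ 0)) := by
  induction lista generalizing E O with
  | nil => simp
  | cons b t ih =>
    simp only [List.foldl_cons, List.filter_cons]
    rcases mod2_cases b with h | h
    · have hE' : ∀ y ∈ E ++ [b], PySem.Int.mod y 2 = 0 := by
        intro y hy
        rcases List.mem_append.mp hy with h' | h'
        · exact hE y h'
        · simp at h'; simpa [h'] using h
      rw [ins_even b E O h hE hO, show E ++ b :: O = (E ++ [b]) ++ O by simp,
        ih (E ++ [b]) O hE' hO, if_pos (decide_eq_true h), if_neg (by simp only [h]; decide)]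
      simp
    · have hO' : ∀ y ∈ O ++ [b], PySem.Int.mod y 2 = 1 := by
        intro y hy
        rcases List.mem_append.mp hy with h' | h'
        · exact hO y h'
        · simp at h'; simpa [h'] using h
      rw [ins_odd b (E ++ O) h, show (E ++ O) ++ [b] = E ++ (O ++ [b]) by simp,
        ih E (O ++ [b]) hE hO', if_neg (by simp only [h]; decide), if_pos (by simp only [h]; decide)]
      simp

-- B's sort: the stable parity-key sort is exactly evens-then-odds in original order
theorem sorted_parity (lista : List Int) :
    PySem.List.sorted lista (fun x => PySem.Int.mod x 2) false
    = lista.filter (fun x => PySem.Int.mod x 2 = 0)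
      ++ lista.filter (fun x => PySem.Int.mod x 2 ≠ 0) := by
  rw [PySem.List.sorted_eq_foldl_insertBy]
  simpa using foldl_ins lista [] [] (by simp) (by simp)

theorem count_evens (lista : List Int) (s : Int) :
    lista.foldl (fun s x => if PySem.Int.mod x 2 = 0 then s + 1 else s) s
    = s + (lista.filter (fun x => PySem.Int.mod x 2 = 0)).length := by
  induction lista generalizing s with
  | nil => simp
  | cons b t ih =>
    simp only [List.foldl_cons, List.filter_cons]
    by_cases h : PySem.Int.mod b 2 = 0
    · rw [if_pos h, ih, if_pos (decide_eq_true h)]; simp [List.length_cons]; ring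
    · rw [if_neg h, ih, if_neg (by simpa using h)]

-- ===== VERDICT =====
theorem grupiraj_po_paritetu_spec : Claim_equal_grupiraj_po_paritetu := by
  intro lista _
  unfold Spec_grupiraj_po_paritetu grupiraj_po_paritetu grupiraj_po_paritetu_alt
  rw [grupiraj_fold_eq]
  simp only [sorted_parity, count_evens, zero_add]
  simp [PySem.List.slice_to_natCast, PySem.List.slice_from_natCast]
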